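-- pv_equiv track=rewrite | github.com/fa-ris/hypnono | interactive.py | contains_time
-- ===== SOURCE A (Python) =====
-- def contains_time(in_str):
--     if len(in_str) == 0:
--         return False
--     to_check = in_str.split()
--     out_time = "-1"
--     for i in range(len(to_check)):
--         if ":" in to_check[i]:
--             out_time = to_check[i]
--     return out_time
-- ===== SOURCE B (Python) =====
-- def contains_time(in_str):
--     if len(in_str) == 0:
--         return False
--     idx = in_str.rfind(':')
--     if idx == -1:
--         return "-1"
--     left = idx
--     while left > 0 and not in_str[left - 1].isspace():
--         left -= 1
--     right = idx
--     while right < len(in_str) and not in_str[right].isspace():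
--         right += 1
--     return in_str[left:right]
-- ===== Notes on version B (the rewrite author's own statement) =====
-- stated objective: alternative
-- what changed: Instead of splitting the whole string into tokens and scanning them all for the last one containing ':', B locates the last colon directly with str.rfind(':') and grows the single enclosing whitespace-delimited token around it.
-- outside the precondition, e.g. on contains_time(''): A returns False, B returns False
import Mathlib
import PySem

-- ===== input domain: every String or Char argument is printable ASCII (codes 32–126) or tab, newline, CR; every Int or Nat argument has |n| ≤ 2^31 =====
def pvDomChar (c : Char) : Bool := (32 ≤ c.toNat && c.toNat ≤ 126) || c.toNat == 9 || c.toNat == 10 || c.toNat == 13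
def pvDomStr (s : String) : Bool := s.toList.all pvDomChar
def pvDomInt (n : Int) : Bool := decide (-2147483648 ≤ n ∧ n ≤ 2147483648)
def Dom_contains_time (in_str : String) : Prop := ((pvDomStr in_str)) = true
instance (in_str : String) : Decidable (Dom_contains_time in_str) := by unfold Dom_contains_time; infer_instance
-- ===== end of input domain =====

-- ===== PORT A =====
-- B replaces split()-and-scan-all-tokens by a backward rfind(':') plus growing the single
-- enclosing token around it, so it never tokenizes the whole string (objective: alternative).
-- (A returns the bool False on the empty string — not a str — so Pre_ excludes it.)
def contains_time (in_str : String) : String :=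
  if PySem.Str.len in_str = 0 then "" else  -- Python A: `return False` (excluded by Pre_)
  let to_check := PySem.Str.split₀ in_str
  (PySem.List.pyRange 0 (PySem.List.len to_check)).foldl
    (fun out_time i =>
      if PySem.Str.isIn ":" (PySem.List.pyGetD to_check i "") then PySem.List.pyGetD to_check i ""
      else out_time)
    "-1"

-- ===== PORT B =====
-- while left > 0 and not in_str[left-1].isspace(): left -= 1
def altLeft (cs : List Char) : Nat → Nat
  | 0 => 0
  | l + 1 => if PySem.Chars.isspace (cs.getD l ' ') then l + 1 else altLeft cs l

-- while right < len(in_str) and not in_str[right].isspace(): right += 1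
def altRight (cs : List Char) (r : Nat) : Nat :=
  if h : r < cs.length then
    if PySem.Chars.isspace cs[r] then r else altRight cs (r + 1)
  else r
termination_by cs.length - r

def contains_time_alt (in_str : String) : String :=
  if PySem.Str.len in_str = 0 then "" else  -- Python B: `return False` (excluded by Pre_)
  let idx := PySem.Str.rfind in_str ":"
  if idx = -1 then "-1" else
  let left := altLeft in_str.toList idx.toNat
  let right := altRight in_str.toList idx.toNat
  PySem.Str.slice in_str (some (left : Int)) (some (right : Int))

-- ===== PRECONDITION & SPEC =====
-- Pre_ excludes only the empty string, on which A (and B) return the Python bool False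
-- rather than a str, so no String value can be claimed there.
def Pre_contains_time (in_str : String) : Prop := in_str ≠ ""
instance (in_str : String) : Decidable (Pre_contains_time in_str) := by
  unfold Pre_contains_time; infer_instance

def pvWitness_contains_time : String := "at 12:30 pm"

def Spec_contains_time (in_str : String) (out : String) : Prop := out = contains_time_alt in_str
instance (in_str : String) (out : String) : Decidable (Spec_contains_time in_str out) := by
  unfold Spec_contains_time; infer_instance

-- ===== CLAIM (what is proved, stated in full; the proofs are below) =====
def Claim_equal_contains_time : Prop := ∀ (in_str : String), Dom_contains_time in_str → Pre_contains_time in_str → Spec_contains_time in_str (contains_time in_str)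

-- ===== LEMMAS AND PROOFS =====

-- one step of split₀.go's state (current run, finished tokens)
def ctStep (st : List Char × List (List Char)) (c : Char) : List Char × List (List Char) :=
  if PySem.Chars.isspace c then
    (if st.1.isEmpty then ([], st.2) else ([], st.1.reverse :: st.2))
  else (c :: st.1, st.2)

theorem go_append (u : List Char) : ∀ (s cur : List Char) (acc : List (List Char)),
    PySem.Chars.split₀.go (u ++ s) cur acc
      = PySem.Chars.split₀.go s (u.foldl ctStep (cur, acc)).1 (u.foldl ctStep (cur, acc)).2 := by
  induction u with
  | nil => intro s cur acc; rfl
  | cons c u' ih =>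
    intro s cur acc
    by_cases hc : PySem.Chars.isspace c = true <;>
      by_cases hcur : cur.isEmpty = true <;>
      simp [PySem.Chars.split₀.go, ctStep, hc, hcur, ih]

theorem go_acc (s : List Char) : ∀ (cur : List Char) (acc : List (List Char)),
    PySem.Chars.split₀.go s cur acc = acc.reverse ++ PySem.Chars.split₀.go s cur [] := by
  induction s with
  | nil =>
    intro cur acc
    by_cases hcur : cur.isEmpty = true <;> simp [PySem.Chars.split₀.go, hcur]
  | cons c s' ih =>
    intro cur acc
    by_cases hc : PySem.Chars.isspace c = true
    · by_cases hcur : cur.isEmpty = true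
      · simp [PySem.Chars.split₀.go, hc, hcur]; exact ih [] acc
      · simp only [PySem.Chars.split₀.go, hc, hcur, if_true, if_false, Bool.false_eq_true]
        rw [ih [] (cur.reverse :: acc), ih [] [cur.reverse]]
        simp
    · simp only [PySem.Chars.split₀.go, hc, Bool.false_eq_true, if_false]
      exact ih (c :: cur) acc

theorem go_run (t : List Char) (ht : ∀ c ∈ t, PySem.Chars.isspace c = false) :
    ∀ (s cur : List Char) (acc : List (List Char)),
    PySem.Chars.split₀.go (t ++ s) cur acc = PySem.Chars.split₀.go s (t.reverse ++ cur) acc := by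
  induction t with
  | nil => intro s cur acc; rfl
  | cons c t' ih =>
    intro s cur acc
    have hc : PySem.Chars.isspace c = false := ht c (by simp)
    simp only [List.cons_append, PySem.Chars.split₀.go, hc, Bool.false_eq_true, if_false]
    rw [ih (fun d hd => ht d (by simp [hd])) s (c :: cur) acc]
    simp

theorem go_mem (s : List Char) : ∀ (cur : List Char) (acc : List (List Char))
    (t : List Char) (c : Char), t ∈ PySem.Chars.split₀.go s cur acc → c ∈ t →
    c ∈ s ∨ c ∈ cur ∨ ∃ t' ∈ acc, c ∈ t' := by
  induction s with
  | nil =>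
    intro cur acc t c hmem hc
    by_cases hcur : cur.isEmpty = true <;>
      simp only [PySem.Chars.split₀.go, hcur, if_true, if_false, Bool.false_eq_true] at hmem
    · right; right; exact ⟨t, by simpa using hmem, hc⟩
    · simp only [List.mem_reverse, List.mem_cons] at hmem
      rcases hmem with h | h
      · subst h; right; left; simpa using hc
      · right; right; exact ⟨t, h, hc⟩
  | cons d s' ih =>
    intro cur acc t c hmem hc
    by_cases hd : PySem.Chars.isspace d = true
    · by_cases hcur : cur.isEmpty = true <;>
        simp only [PySem.Chars.split₀.go, hd, hcur, if_true, if_false, Bool.false_eq_true] at hmem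
      · rcases ih [] acc t c hmem hc with h | h | h
        · left; simp [h]
        · simp at h
        · right; right; exact h
      · rcases ih [] (cur.reverse :: acc) t c hmem hc with h | h | h
        · left; simp [h]
        · simp at h
        · rcases h with ⟨t', ht', hct'⟩
          rcases List.mem_cons.mp ht' with h | h
          · subst h; right; left; simpa using hct'
          · right; right; exact ⟨t', h, hct'⟩
    · simp only [PySem.Chars.split₀.go, hd, Bool.false_eq_true, if_false] at hmem
      rcases ih (d :: cur) acc t c hmem hc with h | h | h
      · left; simp [h]
      · rcases List.mem_cons.mp h with h | h
        · subst h; left; simp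
        · right; left; exact h
      · right; right; exact h

theorem split₀_mem (s t : List Char) (c : Char) (h : t ∈ PySem.Chars.split₀ s) (hc : c ∈ t) :
    c ∈ s := by
  rcases go_mem s [] [] t c h hc with h | h | h
  · exact h
  · simp at h
  · simp at h

-- the THREE-PIECE decomposition split₀ respects
theorem split₀_three (u tok v : List Char)
    (hu : u = [] ∨ ∃ u' c, u = u' ++ [c] ∧ PySem.Chars.isspace c = true)
    (ht0 : tok ≠ []) (ht : ∀ c ∈ tok, PySem.Chars.isspace c = false)
    (hv : v = [] ∨ ∃ d v', v = d :: v' ∧ PySem.Chars.isspace d = true) :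
    PySem.Chars.split₀ (u ++ tok ++ v)
      = PySem.Chars.split₀ u ++ tok :: PySem.Chars.split₀ v := by
  have hfst : (u.foldl ctStep ([], [])).1 = [] := by
    rcases hu with h | ⟨u', c, h, hc⟩
    · simp [h]
    · subst h
      rw [List.foldl_append]
      simp only [List.foldl_cons, List.foldl_nil, ctStep, hc, if_true]
      by_cases h2 : (u'.foldl ctStep ([], [])).1.isEmpty = true <;> simp [h2]
  have hsplitu : PySem.Chars.split₀ u = (u.foldl ctStep ([], [])).2.reverse := by
    show PySem.Chars.split₀.go u [] [] = _
    have := go_append u [] [] []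
    rw [List.append_nil] at this
    rw [this, hfst]
    rfl
  have htokrev : tok.reverse.isEmpty = false := by
    simpa using ht0
  rw [List.append_assoc]
  show PySem.Chars.split₀.go (u ++ (tok ++ v)) [] [] = _
  rw [go_append u (tok ++ v) [] [], hfst, go_run tok ht v [] _]
  rcases hv with h | ⟨d, v', h, hd⟩
  · subst h
    simp only [List.append_nil, PySem.Chars.split₀.go]
    rw [if_neg (by simpa using ht0)]
    rw [hsplitu]
    simp [PySem.Chars.split₀, PySem.Chars.split₀.go]
  · subst h
    simp only [List.append_nil, PySem.Chars.split₀.go]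
    rw [if_pos hd, if_neg (by simpa using ht0)]
    rw [go_acc v' [] _]
    have hv' : PySem.Chars.split₀ (d :: v') = PySem.Chars.split₀.go v' [] [] := by
      show PySem.Chars.split₀.go (d :: v') [] [] = _
      simp [PySem.Chars.split₀.go, hd]
    simp [hsplitu, hv']

-- rfind.go: -1 means no occurrence at any k ≤ m
theorem rfind_go_neg (s sub : List Char) : ∀ m : Nat,
    PySem.Chars.rfind.go s sub m = -1 ↔ ∀ k ≤ m, sub.isPrefixOf (s.drop k) = false := by
  intro m
  induction m with
  | zero =>
    cases h : sub.isPrefixOf s <;> simp [PySem.Chars.rfind.go, h]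
  | succ m ih =>
    cases h : sub.isPrefixOf (s.drop (m + 1)) with
    | true =>
      simp only [PySem.Chars.rfind.go, h, if_true]
      constructor
      · intro hy; omega
      · intro hall
        have := hall (m + 1) le_rfl
        simp [h] at this
    | false =>
      simp only [PySem.Chars.rfind.go, h, Bool.false_eq_true, if_false]
      rw [ih]
      constructor
      · intro hall k hk
        rcases Nat.lt_or_ge k (m + 1) with hlt | hge
        · exact hall k (by omega)
        · have : k = m + 1 := by omega
          subst this; exact h
      · intro hall k hk; exact hall k (by omega)

-- rfind.go: otherwise it is the largest k ≤ m with an occurrence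
theorem rfind_go_pos (s sub : List Char) : ∀ m : Nat,
    PySem.Chars.rfind.go s sub m ≠ -1 →
    ∃ k : Nat, PySem.Chars.rfind.go s sub m = (k : Int) ∧ k ≤ m ∧
      sub.isPrefixOf (s.drop k) = true ∧
      ∀ k', k < k' → k' ≤ m → sub.isPrefixOf (s.drop k') = false := by
  intro m
  induction m with
  | zero =>
    intro hne
    by_cases h : sub.isPrefixOf s = true
    · exact ⟨0, by simp [PySem.Chars.rfind.go, h], le_rfl, by simpa using h, by omega⟩
    · exact absurd (by simp [PySem.Chars.rfind.go, h]) hne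
  | succ m ih =>
    intro hne
    cases h : sub.isPrefixOf (s.drop (m + 1)) with
    | true =>
      exact ⟨m + 1, by simp [PySem.Chars.rfind.go, h], le_rfl, h, by omega⟩
    | false =>
      have hstep : PySem.Chars.rfind.go s sub (m + 1) = PySem.Chars.rfind.go s sub m := by
        simp [PySem.Chars.rfind.go, h]
      rw [hstep] at hne ⊢
      rcases ih hne with ⟨k, hk1, hk2, hk3, hk4⟩
      refine ⟨k, hk1, by omega, hk3, ?_⟩
      intro k' hlt hle
      rcases Nat.lt_or_ge k' (m + 1) with hlt' | hge'
      · exact hk4 k' hlt (by omega)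
      · have : k' = m + 1 := by omega
        subst this; exact h

theorem singleton_prefix_drop (c : Char) (s : List Char) (k : Nat) :
    [c].isPrefixOf (s.drop k) = true ↔ s[k]? = some c := by
  rw [← List.head?_drop]
  cases s.drop k with
  | nil => simp
  | cons x xs => simp; exact eq_comm

theorem altLeft_spec (cs : List Char) : ∀ j : Nat,
    altLeft cs j ≤ j ∧
    (∀ k, altLeft cs j ≤ k → k < j → PySem.Chars.isspace (cs.getD k ' ') = false) ∧
    (altLeft cs j = 0 ∨
      ∃ l', altLeft cs j = l' + 1 ∧ PySem.Chars.isspace (cs.getD l' ' ') = true) := by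
  intro j
  induction j with
  | zero => exact ⟨le_rfl, by omega, Or.inl rfl⟩
  | succ j ih =>
    cases h : PySem.Chars.isspace (cs.getD j ' ') with
    | true =>
      have he : altLeft cs (j + 1) = j + 1 := by
        simp only [altLeft]; rw [if_pos h]
      exact ⟨by omega, fun k hk1 hk2 => by rw [he] at hk1; omega, Or.inr ⟨j, he, h⟩⟩
    | false =>
      have he : altLeft cs (j + 1) = altLeft cs j := by
        simp only [altLeft]
        rw [if_neg]; rw [h]; simp
      obtain ⟨ih1, ih2, ih3⟩ := ih
      refine ⟨by omega, ?_, by rw [he]; exact ih3⟩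
      intro k hk1 hk2
      rw [he] at hk1
      rcases Nat.lt_or_ge k j with hlt | hge
      · exact ih2 k hk1 hlt
      · have : k = j := by omega
        subst this; exact h

theorem altRight_aux (cs : List Char) : ∀ (n j : Nat), cs.length - j ≤ n → j ≤ cs.length →
    j ≤ altRight cs j ∧ altRight cs j ≤ cs.length ∧
    (∀ k, j ≤ k → k < altRight cs j → PySem.Chars.isspace (cs.getD k ' ') = false) ∧
    (altRight cs j = cs.length ∨
      PySem.Chars.isspace (cs.getD (altRight cs j) ' ') = true) := by
  intro n
  induction n with
  | zero =>
    intro j hn hj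
    have hj' : j = cs.length := by omega
    have hlt : ¬ j < cs.length := by omega
    have he : altRight cs j = j := by rw [altRight, dif_neg hlt]
    exact ⟨by omega, by omega, fun k hk1 hk2 => by omega, Or.inl (by omega)⟩
  | succ n ih =>
    intro j hn hj
    by_cases h : j < cs.length
    · cases hsp : PySem.Chars.isspace cs[j] with
      | true =>
        have he : altRight cs j = j := by
          rw [altRight, dif_pos h, if_pos hsp]
        rw [he]
        refine ⟨le_rfl, by omega, fun k hk1 hk2 => by omega, Or.inr ?_⟩
        rw [List.getD_eq_getElem cs ' ' h]; exact hsp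
      | false =>
        have he : altRight cs j = altRight cs (j + 1) := by
          rw [altRight, dif_pos h, if_neg (by simp [hsp])]
        obtain ⟨ih1, ih2, ih3, ih4⟩ := ih (j + 1) (by omega) (by omega)
        rw [he]
        refine ⟨by omega, ih2, ?_, ih4⟩
        intro k hk1 hk2
        rcases Nat.lt_or_ge j k with hlt | hge
        · exact ih3 k (by omega) hk2
        · have : k = j := by omega
          subst this
          rw [List.getD_eq_getElem cs ' ' h]; exact hsp
    · have hj' : j = cs.length := by omega
      have he : altRight cs j = j := by rw [altRight, dif_neg h]
      exact ⟨by omega, by omega, fun k hk1 hk2 => by omega, Or.inl (by omega)⟩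

theorem altRight_spec (cs : List Char) (j : Nat) (hj : j ≤ cs.length) :
    j ≤ altRight cs j ∧ altRight cs j ≤ cs.length ∧
    (∀ k, j ≤ k → k < altRight cs j → PySem.Chars.isspace (cs.getD k ' ') = false) ∧
    (altRight cs j = cs.length ∨
      PySem.Chars.isspace (cs.getD (altRight cs j) ' ') = true) :=
  altRight_aux cs (cs.length - j) j le_rfl hj

theorem foldl_keep_of_none {α : Type} (p : α → Bool) (l : List α) (i : α)
    (h : ∀ t ∈ l, p t = false) :
    l.foldl (fun o t => if p t then t else o) i = i := by
  induction l generalizing i with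
  | nil => rfl
  | cons x xs ih =>
    simp only [List.foldl_cons, h x (by simp), Bool.false_eq_true, if_false]
    exact ih i (fun t htm => h t (by simp [htm]))

theorem foldl_lift (ts : List (List Char)) : ∀ init : List Char,
    (ts.map String.ofList).foldl
        (fun o t => if PySem.Str.isIn ":" t then t else o) (String.ofList init)
      = String.ofList (ts.foldl (fun o t => if PySem.Chars.isIn [':'] t then t else o) init) := by
  induction ts with
  | nil => intro init; rfl
  | cons t ts' ih =>
    intro init
    have hb : PySem.Str.isIn ":" (String.ofList t) = PySem.Chars.isIn [':'] t := by
      rw [PySem.Str.isIn_eq]; simp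
    simp only [List.map_cons, List.foldl_cons, hb]
    by_cases hp : PySem.Chars.isIn [':'] t = true
    · rw [if_pos hp, if_pos hp]; exact ih t
    · rw [if_neg hp, if_neg hp]; exact ih init

theorem str_split₀_eq (s : String) :
    PySem.Str.split₀ s = (PySem.Chars.split₀ s.toList).map String.ofList := by
  rw [← PySem.Str.split₀_map_toList s, List.map_map]
  simp [Function.comp_def]

theorem isspace_colon : PySem.Chars.isspace ':' = false := by decide

theorem charfold_eq_tok (cs : List Char) (j l r : Nat)
    (hjlt : j < cs.length) (hjv : cs[j]'hjlt = ':')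
    (hnolater : ∀ k', j < k' → k' ≤ cs.length → ([':'] : List Char).isPrefixOf (cs.drop k') = false)
    (hlj : l ≤ j) (hjr : j < r) (hrlen : r ≤ cs.length)
    (hlb : l = 0 ∨ ∃ l', l = l' + 1 ∧ PySem.Chars.isspace (cs.getD l' ' ') = true)
    (hmid : ∀ k, l ≤ k → k < r → k ≠ j → PySem.Chars.isspace (cs.getD k ' ') = false)
    (hrb : r = cs.length ∨ PySem.Chars.isspace (cs.getD r ' ') = true) :
    (PySem.Chars.split₀ cs).foldl
        (fun o t => if PySem.Chars.isIn [':'] t then t else o) ['-', '1']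
      = (cs.drop l).take (r - l) := by
  set u := cs.take l with hu
  set tok := (cs.drop l).take (r - l) with htok
  set v := cs.drop r with hv
  have htoklen : tok.length = r - l := by
    simp [htok]; omega
  have htokget : ∀ (i : Nat) (h : i < tok.length), tok[i] = cs[l + i]'(by omega) := by
    intro i h
    simp only [htok, List.getElem_take, List.getElem_drop]
  have hdecomp : cs = u ++ tok ++ v := by
    rw [List.append_assoc, hu, htok, hv]
    have hdd : List.drop r cs = List.drop (r - l) (List.drop l cs) := by
      rw [List.drop_drop]; congr 1; omega
    rw [hdd, List.take_append_drop, List.take_append_drop]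
  -- every char of tok is non-space
  have htns : ∀ c ∈ tok, PySem.Chars.isspace c = false := by
    intro c hc
    rcases List.mem_iff_getElem.mp hc with ⟨i, hi, hci⟩
    rw [htokget i hi] at hci
    subst hci
    by_cases hij : l + i = j
    · rw [show cs[l + i]'(by omega) = cs[j]'hjlt by congr 1]
      rw [hjv]; exact isspace_colon
    · have := hmid (l + i) (by omega) (by omega) hij
      rwa [List.getD_eq_getElem cs ' ' (by omega)] at this
  have ht0 : tok ≠ [] := by
    have : 0 < tok.length := by omega
    exact List.ne_nil_of_length_pos this
  -- boundary conditions
  have hub : u = [] ∨ ∃ u' c, u = u' ++ [c] ∧ PySem.Chars.isspace c = true := by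
    rcases hlb with h0 | ⟨l', hl', hsp⟩
    · left; simp [hu, h0]
    · right
      have hl'lt : l' < cs.length := by omega
      refine ⟨cs.take l', cs[l']'hl'lt, ?_, ?_⟩
      · rw [hu, hl']; exact List.take_succ_eq_append_getElem hl'lt
      · rwa [List.getD_eq_getElem cs ' ' hl'lt] at hsp
  have hvb : v = [] ∨ ∃ d v', v = d :: v' ∧ PySem.Chars.isspace d = true := by
    rcases Nat.lt_or_ge r cs.length with hrlt | hge
    · right
      refine ⟨cs[r]'hrlt, cs.drop (r + 1), List.drop_eq_getElem_cons hrlt, ?_⟩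
      rcases hrb with h0 | hsp
      · omega
      · rwa [List.getD_eq_getElem cs ' ' hrlt] at hsp
    · left
      have : r = cs.length := by omega
      simp [hv, this]
  have hsplit : PySem.Chars.split₀ cs = PySem.Chars.split₀ u ++ tok :: PySem.Chars.split₀ v := by
    conv_lhs => rw [hdecomp]
    exact split₀_three u tok v hub ht0 htns hvb
  -- tok contains the colon
  have hintok : PySem.Chars.isIn [':'] tok = true := by
    rw [PySem.Chars.isIn_iff_infix, List.singleton_infix_iff]
    have hjl : j - l < tok.length := by omega
    have := htokget (j - l) hjl
    rw [show cs[l + (j - l)]'(by omega) = cs[j]'hjlt by congr 1; omega, hjv] at this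
    rw [← this]
    exact List.getElem_mem hjl
  -- no token of v contains a colon
  have hvfree : ∀ t ∈ PySem.Chars.split₀ v, PySem.Chars.isIn [':'] t = false := by
    intro t htv
    cases hin : PySem.Chars.isIn [':'] t with
    | false => rfl
    | true =>
      exfalso
      rw [PySem.Chars.isIn_iff_infix, List.singleton_infix_iff] at hin
      have hcv : (':' : Char) ∈ v := split₀_mem v t ':' htv hin
      rcases List.mem_iff_getElem.mp hcv with ⟨i, hi, hci⟩
      have hilen : i < cs.length - r := by simpa [hv] using hi
      have : v[i]'hi = cs[r + i]'(by omega) := by simp [hv]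
      rw [this] at hci
      have hpre : ([':'] : List Char).isPrefixOf (cs.drop (r + i)) = true := by
        rw [singleton_prefix_drop]
        rw [List.getElem?_eq_getElem (by omega : r + i < cs.length)]
        rw [hci]
      have := hnolater (r + i) (by omega) (by omega)
      rw [this] at hpre
      cases hpre
  rw [hsplit, List.foldl_append, List.foldl_cons, if_pos hintok]
  exact foldl_keep_of_none _ _ tok hvfree

-- ===== VERDICT (by name: the statement is the Claim_ definition above) =====
theorem contains_time_spec : Claim_equal_contains_time := by
  intro s _hdom hpre
  unfold Spec_contains_time contains_time contains_time_alt
  have hpre' : s ≠ "" := hpre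
  have hne : s.toList ≠ [] := fun h => hpre' (String.toList_eq_nil_iff.mp h)
  have hlen : ¬ PySem.Str.len s = 0 := by
    rw [PySem.Str.len_eq]
    simpa using hpre'
  rw [if_neg hlen, if_neg hlen]
  have hidx : PySem.Str.rfind s ":" = PySem.Chars.rfind.go s.toList [':'] s.toList.length := by
    rw [PySem.Str.rfind_eq]; rfl
  rw [PySem.List.foldl_pyRange_zero_pyGetD (PySem.Str.split₀ s) ""
        (fun o t => if PySem.Str.isIn ":" t then t else o) "-1"]
  rw [str_split₀_eq s]
  rw [show ("-1" : String) = String.ofList ['-', '1'] from rfl]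
  rw [foldl_lift]
  by_cases hneg : PySem.Chars.rfind.go s.toList [':'] s.toList.length = -1
  · rw [hidx, hneg, if_pos rfl]
    have hnocolon : ∀ t ∈ PySem.Chars.split₀ s.toList, PySem.Chars.isIn [':'] t = false := by
      intro t htv
      cases hin : PySem.Chars.isIn [':'] t with
      | false => rfl
      | true =>
        exfalso
        rw [PySem.Chars.isIn_iff_infix, List.singleton_infix_iff] at hin
        have hcv : (':' : Char) ∈ s.toList := split₀_mem s.toList t ':' htv hin
        rcases List.mem_iff_getElem.mp hcv with ⟨i, hi, hci⟩
        have hpre : ([':'] : List Char).isPrefixOf (s.toList.drop i) = true := by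
          rw [singleton_prefix_drop, List.getElem?_eq_getElem hi, hci]
        rw [(rfind_go_neg s.toList [':'] s.toList.length).mp hneg i (by omega)] at hpre
        cases hpre
    rw [foldl_keep_of_none _ _ _ hnocolon]
  · obtain ⟨j, hj1, hj2, hj3, hj4⟩ := rfind_go_pos s.toList [':'] s.toList.length hneg
    rw [singleton_prefix_drop] at hj3
    rcases List.getElem?_eq_some_iff.mp hj3 with ⟨hjlt, hjv⟩
    rw [hidx, hj1]
    rw [if_neg (by omega)]
    have hton : ((j : Int)).toNat = j := Int.toNat_natCast j
    rw [hton]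
    obtain ⟨hal1, hal2, hal3⟩ := altLeft_spec s.toList j
    obtain ⟨har1, har2, har3, har4⟩ := altRight_spec s.toList j (le_of_lt hjlt)
    set l := altLeft s.toList j with hl
    set r := altRight s.toList j with hr
    have hjr : j < r := by
      rcases Nat.lt_or_ge j r with h | h
      · exact h
      · exfalso
        have hrj : r = j := by omega
        rcases har4 with h0 | hsp
        · omega
        · rw [hrj, List.getD_eq_getElem s.toList ' ' hjlt, hjv] at hsp
          rw [isspace_colon] at hsp
          cases hsp
    have hmid : ∀ k, l ≤ k → k < r → k ≠ j →
        PySem.Chars.isspace (s.toList.getD k ' ') = false := by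
      intro k hk1 hk2 hk3
      rcases Nat.lt_or_ge k j with h | h
      · exact hal2 k hk1 h
      · exact har3 k (by omega) hk2
    have hnolater : ∀ k', j < k' → k' ≤ s.toList.length →
        ([':'] : List Char).isPrefixOf (s.toList.drop k') = false := hj4
    have hmain := charfold_eq_tok s.toList j l r hjlt hjv hnolater hal1 hjr har2 hal3 hmid har4
    rw [hmain]
    have hslice : (PySem.Str.slice s (some (l : Int)) (some (r : Int))).toList
        = (s.toList.drop l).take (r - l) := by
      rw [PySem.Str.toList_slice, PySem.Chars.slice_eq_listSlice, PySem.List.slice_natCast]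
    calc String.ofList ((s.toList.drop l).take (r - l))
        = String.ofList (PySem.Str.slice s (some (l : Int)) (some (r : Int))).toList := by
          rw [hslice]
      _ = PySem.Str.slice s (some (l : Int)) (some (r : Int)) := String.ofList_toList
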